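-- pv_equiv track=rewrite | github.com/hagukin/FormatApplier_ULIFT | formatApplier.py | return_overlapped
-- ===== SOURCE A (Python) =====
-- def return_overlapped(line: str) -> list[bool]:
--     # 각 구간 별 어떤 태그를 적용중인지를 리스트로 반환.
--     overlapped = [""] * len(line)
--     new_line = line
--     tag_opened = -1
--     for i in range(len(new_line)-1):
--         if tag_opened == -1 and new_line[i] == "<":
--             tag_opened = i
--         if new_line[i:i+2] == "</" and tag_opened != -1:
--             tag_end = new_line.find(">",i)
--             for j in range(tag_opened, i):
--                 overlapped[j] = new_line[i+2:tag_end] # 태그명으로 저장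
--     return overlapped
-- ===== SOURCE B (Python) =====
-- def return_overlapped(line: str) -> list[bool]:
--     # Each closing tag in A refills from the FIRST '<' up to the closer, so the
--     # last closer's fill wins everywhere: compute it directly in one pass.
--     n = len(line)
--     i = line.rfind("</")
--     if i == -1:
--         return [""] * n
--     t = line.find("<")
--     name = line[i + 2:line.find(">", i)]
--     return [""] * t + [name] * (i - t) + [""] * (n - i)
-- ===== Notes on version B (the rewrite author's own statement) =====
-- stated objective: faster
-- what changed: Replaces the scan with nested refill loops by a closed-form construction: since every closing tag refills from the first '<', only the last '</' matters, so B locates it with rfind/find and builds the three constant blocks directly.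
import Mathlib
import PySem

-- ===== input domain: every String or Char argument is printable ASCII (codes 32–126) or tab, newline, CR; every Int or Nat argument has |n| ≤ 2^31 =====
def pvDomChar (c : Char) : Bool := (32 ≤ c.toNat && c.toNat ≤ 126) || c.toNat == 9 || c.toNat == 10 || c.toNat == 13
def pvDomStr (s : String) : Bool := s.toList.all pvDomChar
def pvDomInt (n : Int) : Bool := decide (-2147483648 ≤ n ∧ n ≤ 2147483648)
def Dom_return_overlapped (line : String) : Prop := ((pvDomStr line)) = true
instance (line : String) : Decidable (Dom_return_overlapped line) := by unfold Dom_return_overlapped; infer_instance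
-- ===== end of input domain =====

-- B replaces A's rescanning nested fill loops (O(n^2)) by a closed-form three-block construction
-- from the LAST "</" occurrence (rfind) — the last closer's refill always wins in A.

-- shared subexpression of both Pythons: new_line[i+2:new_line.find(">", i)]
def nameAt (s : List Char) (i : Int) : String :=
  String.ofList (PySem.List.slice s (some (i + 2)) (some (PySem.Chars.findFrom s ['>'] i none)))

-- ===== PORT A =====
-- loop body of A's 'for i in range(len(new_line)-1)'
def roStep (s : List Char) (st : List String × Int) (i : Int) : List String × Int :=
  -- if tag_opened == -1 and new_line[i] == "<": tag_opened = i
  let tag : Int := if st.2 = -1 ∧ PySem.List.pyGet? s i = some '<' then i else st.2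
  -- if new_line[i:i+2] == "</" and tag_opened != -1: fill overlapped[tag_opened..i-1]
  if PySem.List.slice s (some i) (some (i + 2)) = ['<', '/'] ∧ tag ≠ -1 then
    ((PySem.List.pyRange tag i 1).foldl
        (fun ov j => PySem.List.pySetD ov j (nameAt s i)) st.1,
      tag)
  else (st.1, tag)

def return_overlapped (line : String) : List String :=
  let s := line.toList
  ((PySem.List.pyRange 0 ((s.length : Int) - 1) 1).foldl (roStep s)
      (List.replicate s.length "", -1)).1

-- ===== PORT B =====
def return_overlapped_alt (line : String) : List String :=
  let s := line.toList
  let n := s.length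
  let i := PySem.Chars.rfind s ['<', '/']
  if i = -1 then List.replicate n ""
  else
    let t := PySem.Chars.find s ['<']
    List.replicate t.toNat "" ++ List.replicate (i - t).toNat (nameAt s i)
      ++ List.replicate ((n : Int) - i).toNat ""

-- ===== PRECONDITION & SPEC =====
def Spec_return_overlapped (line : String) (out : List String) : Prop := out = return_overlapped_alt line
instance (line : String) (out : List String) : Decidable (Spec_return_overlapped line out) := by unfold Spec_return_overlapped; infer_instance

-- ===== CLAIM (what is proved, stated in full; the proofs are below) =====
def Claim_equal_return_overlapped : Prop := ∀ (line : String), Dom_return_overlapped line → Spec_return_overlapped line (return_overlapped line)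

-- ===== LEMMAS AND PROOFS =====

-- last j < m with s[j:j+2] == "</", scanning from the right
def lastCloser (s : List Char) : Nat → Option Nat
  | 0 => none
  | m + 1 => if ['<', '/'] <+: s.drop m then some m else lastCloser s m

-- value of A's overlapped list after the iterations i = 0 .. m-1
def ovVal (s : List Char) (m : Nat) : List String :=
  match lastCloser s m with
  | none => List.replicate s.length ""
  | some c =>
      let f := (PySem.Chars.find s ['<']).toNat
      List.replicate f "" ++ List.replicate (c - f) (nameAt s (c : Int))
        ++ List.replicate (s.length - c) ""

-- value of A's tag_opened after the iterations i = 0 .. m-1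
def tagVal (s : List Char) (m : Nat) : Int :=
  if '<' ∈ s.take m then PySem.Chars.find s ['<'] else -1

lemma prefix_pair_iff (l : List Char) : ['<', '/'] <+: l ↔ l.take 2 = ['<', '/'] := by
  rw [List.prefix_iff_eq_take]; exact eq_comm

lemma single_prefix (c : Char) (l : List Char) : [c] <+: l ↔ l.head? = some c := by
  cases l with
  | nil => simp
  | cons a t => simp [List.prefix_cons_iff, eq_comm]

lemma mem_take_iff (c : Char) (s : List Char) (m : Nat) :
    c ∈ s.take m ↔ ∃ j < m, s[j]? = some c := by
  constructor
  · intro h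
    obtain ⟨j, hj, he⟩ := List.getElem_of_mem h
    have hj' : j < m := by simp at hj; omega
    have hjs : j < s.length := by simp at hj; omega
    refine ⟨j, hj', ?_⟩
    rw [List.getElem?_eq_getElem hjs, ← he, List.getElem_take]
  · rintro ⟨j, hj, he⟩
    have hjs : j < s.length := (List.getElem?_eq_some_iff.mp he).1
    have hlt : j < (s.take m).length := by simp; omega
    have : (s.take m)[j] = c := by
      rw [List.getElem_take]; exact (List.getElem?_eq_some_iff.mp he).2
    exact this ▸ List.getElem_mem hlt

lemma find_lt_spec (s : List Char) (h : '<' ∈ s) :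
    0 ≤ PySem.Chars.find s ['<'] ∧
    s[(PySem.Chars.find s ['<']).toNat]? = some '<' ∧
    ∀ j < (PySem.Chars.find s ['<']).toNat, s[j]? ≠ some '<' := by
  have hnn : 0 ≤ PySem.Chars.find s ['<'] :=
    (PySem.Chars.find_nonneg_iff _ _).mpr ((List.singleton_infix_iff '<' s).mpr h)
  obtain ⟨h1, h2⟩ := PySem.Chars.find_spec hnn
  refine ⟨hnn, ?_, ?_⟩
  · rw [← List.head?_drop]; exact (single_prefix _ _).mp h1
  · intro j hj hc
    exact h2 j hj ((single_prefix _ _).mpr (by rw [List.head?_drop]; exact hc))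

lemma fill_eq (ov : List String) (v : String) (f i : Nat) (hfi : f ≤ i) (hi : i ≤ ov.length) :
    (PySem.List.pyRange (f : Int) (i : Int) 1).foldl (fun acc j => PySem.List.pySetD acc j v) ov
      = ov.take f ++ List.replicate (i - f) v ++ ov.drop i := by
  induction i, hfi using Nat.le_induction with
  | base =>
    rw [PySem.List.pyRange_one_eq_nil (by omega)]
    simp
  | succ i hfi ih =>
    have hi' : i < ov.length := by omega
    rw [show (((i:Nat)+1 :Nat) : Int) = ((i:Int)+1) by push_cast; ring,
      PySem.List.pyRange_one_succ_right (by exact_mod_cast hfi), List.foldl_append,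
      ih (by omega)]
    simp only [List.foldl_cons, List.foldl_nil, PySem.List.pySetD_natCast]
    rw [List.drop_eq_getElem_cons hi', List.set_append, List.set_append]
    have hlen : (List.take f ov ++ List.replicate (i - f) v).length = i := by
      simp; omega
    rw [hlen, Nat.sub_self, List.set_cons_zero, if_neg (lt_irrefl i)]
    have h2 : i + 1 - f = (i - f) + 1 := by omega
    rw [h2, List.replicate_succ']
    simp [List.append_assoc]

lemma closer_len {s : List Char} {j : Nat} (h : ['<', '/'] <+: s.drop j) :
    j + 2 ≤ s.length := by
  have := h.length_le
  simp at this
  omega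

lemma closer_head {s : List Char} {j : Nat} (h : ['<', '/'] <+: s.drop j) :
    s[j]? = some '<' := by
  obtain ⟨t, ht⟩ := h
  rw [← List.head?_drop, ← ht]
  rfl

lemma lastCloser_spec (s : List Char) (m c : Nat) (h : lastCloser s m = some c) :
    c < m ∧ ['<', '/'] <+: s.drop c := by
  induction m with
  | zero => simp [lastCloser] at h
  | succ m ih =>
    unfold lastCloser at h
    split at h
    · cases h
      refine ⟨Nat.lt_succ_self _, by assumption⟩
    · obtain ⟨h1, h2⟩ := ih h
      exact ⟨Nat.lt_succ_of_lt h1, h2⟩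

lemma fn_le {s : List Char} {k : Nat} (hat : s[k]? = some '<') :
    (PySem.Chars.find s ['<']).toNat ≤ k := by
  have hs : '<' ∈ s := List.mem_of_getElem? hat
  obtain ⟨-, -, hmin⟩ := find_lt_spec s hs
  by_contra h
  exact hmin k (by omega) hat

lemma tag_step (s : List Char) (m : Nat) :
    (if tagVal s m = -1 ∧ s[m]? = some '<' then (m : Int) else tagVal s m) = tagVal s (m + 1) := by
  unfold tagVal
  by_cases h0 : '<' ∈ s.take m
  · have hs : '<' ∈ s := List.mem_of_mem_take h0
    obtain ⟨j, hj, he⟩ := (mem_take_iff _ _ _).mp h0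
    have hm1 : '<' ∈ s.take (m + 1) := (mem_take_iff _ _ _).mpr ⟨j, by omega, he⟩
    obtain ⟨hnn, -, -⟩ := find_lt_spec s hs
    rw [if_pos h0, if_pos hm1, if_neg (fun hcon => by omega)]
  · rw [if_neg h0]
    by_cases hm : s[m]? = some '<'
    · have hm1 : '<' ∈ s.take (m + 1) := (mem_take_iff _ _ _).mpr ⟨m, Nat.lt_succ_self m, hm⟩
      rw [if_pos ⟨rfl, hm⟩, if_pos hm1]
      have hs : '<' ∈ s := List.mem_of_getElem? hm
      obtain ⟨hnn, hat, hmin⟩ := find_lt_spec s hs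
      have h1 : (PySem.Chars.find s ['<']).toNat ≤ m := fn_le hm
      have h2 : ¬ (PySem.Chars.find s ['<']).toNat < m := fun h =>
        h0 ((mem_take_iff _ _ _).mpr ⟨_, h, hat⟩)
      omega
    · have hm1 : '<' ∉ s.take (m + 1) := fun h => by
        obtain ⟨j, hj, he⟩ := (mem_take_iff _ _ _).mp h
        rcases Nat.lt_succ_iff_lt_or_eq.mp hj with h' | h'
        · exact h0 ((mem_take_iff _ _ _).mpr ⟨j, h', he⟩)
        · exact hm (h' ▸ he)
      rw [if_neg (fun hcon => hm hcon.2), if_neg hm1]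

lemma slice_pair (s : List Char) (m : Nat) :
    PySem.List.slice s (some (m : Int)) (some ((m : Int) + 2)) = ['<', '/']
      ↔ ['<', '/'] <+: s.drop m := by
  rw [show ((m : Int) + 2) = ((m : Int) + ((2 : Nat) : Int)) from by norm_num,
    PySem.List.slice_natCast_add, prefix_pair_iff]

lemma take_blocks (f c n' : Nat) (old : String) :
    (List.replicate f "" ++ List.replicate (c - f) old ++ List.replicate n' "").take f
      = List.replicate f ("" : String) := by
  simp

lemma drop_blocks (f c n m : Nat) (old : String) (hfc : f ≤ c) (hcm : c ≤ m) :
    (List.replicate f "" ++ List.replicate (c - f) old ++ List.replicate (n - c) "").drop m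
      = List.replicate (n - m) ("" : String) := by
  simp [List.drop_append, List.drop_replicate]
  rw [show f - m = 0 by omega, show c - f - (m - f) = 0 by omega,
    show n - c - (m - f - (c - f)) = n - m by omega]
  simp

lemma roStep_eq (s : List Char) (m : Nat) :
    roStep s (ovVal s m, tagVal s m) (m : Int) = (ovVal s (m + 1), tagVal s (m + 1)) := by
  unfold roStep
  simp only [PySem.List.pyGet?_natCast]
  rw [tag_step]
  by_cases hc : ['<', '/'] <+: s.drop m
  · have hm2 : m + 2 ≤ s.length := closer_len hc
    have hat : s[m]? = some '<' := closer_head hc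
    have hs : '<' ∈ s := List.mem_of_getElem? hat
    obtain ⟨hnn, hfat, hmin⟩ := find_lt_spec s hs
    have hfm : (PySem.Chars.find s ['<']).toNat ≤ m := fn_le hat
    have htag : tagVal s (m + 1) = ((PySem.Chars.find s ['<']).toNat : Int) := by
      rw [tagVal, if_pos ((mem_take_iff _ _ _).mpr ⟨m, Nat.lt_succ_self m, hat⟩),
        Int.toNat_of_nonneg hnn]
    rw [if_pos ⟨(slice_pair s m).mpr hc, by rw [htag]; omega⟩, htag]
    have hlc1 : lastCloser s (m + 1) = some m := by
      rw [show lastCloser s (m + 1)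
          = if ['<', '/'] <+: s.drop m then some m else lastCloser s m from rfl, if_pos hc]
    cases hlc : lastCloser s m with
    | none =>
      have hlen : m ≤ (ovVal s m).length := by simp [ovVal, hlc]; omega
      rw [fill_eq _ _ _ _ hfm hlen]
      simp only [ovVal, hlc, hlc1]
      rw [List.take_replicate, List.drop_replicate, Nat.min_eq_left (by omega)]
    | some c =>
      obtain ⟨hcm, hcc⟩ := lastCloser_spec s m c hlc
      have hfc : (PySem.Chars.find s ['<']).toNat ≤ c := fn_le (closer_head hcc)
      have hc2 : c + 2 ≤ s.length := closer_len hcc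
      have hlen : m ≤ (ovVal s m).length := by simp [ovVal, hlc]; omega
      rw [fill_eq _ _ _ _ hfm hlen]
      simp only [ovVal, hlc, hlc1]
      rw [take_blocks, drop_blocks _ _ _ _ _ hfc (by omega)]
  · rw [if_neg (fun hcon => hc ((slice_pair s m).mp hcon.1))]
    have : lastCloser s (m + 1) = lastCloser s m := by
      rw [show lastCloser s (m + 1)
          = if ['<', '/'] <+: s.drop m then some m else lastCloser s m from rfl, if_neg hc]
    rw [show ovVal s (m + 1) = ovVal s m from by rw [ovVal, this]; rfl]

-- the fold of pyRange 0 m over A's loop body lands in the closed-form state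
lemma loopA_inv (s : List Char) (m : Nat) :
    (PySem.List.pyRange 0 (m : Int) 1).foldl (roStep s) (List.replicate s.length "", -1)
      = (ovVal s m, tagVal s m) := by
  induction m with
  | zero =>
    rw [PySem.List.pyRange_one_eq_nil (by omega)]
    simp [ovVal, lastCloser, tagVal]
  | succ m ih =>
    rw [show (((m : Nat) + 1 : Nat) : Int) = ((m : Int) + 1) from by push_cast; ring,
      PySem.List.pyRange_one_succ_right (by omega), List.foldl_append, ih]
    simpa using roStep_eq s m

lemma go_eq (s : List Char) (m : Nat) :
    PySem.Chars.rfind.go s ['<', '/'] m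
      = (lastCloser s (m + 1)).elim (-1) (fun c => (c : Int)) := by
  induction m with
  | zero =>
    rw [PySem.Chars.rfind.go.eq_def]
    simp only [lastCloser, List.drop_zero]
    by_cases h : ['<', '/'] <+: s
    · rw [if_pos ((List.isPrefixOf_iff_prefix).mpr h), if_pos h]; rfl
    · rw [if_neg (by simpa using h), if_neg h]; rfl
  | succ j ih =>
    rw [PySem.Chars.rfind.go.eq_def]
    simp only
    show _ = (lastCloser s (j + 1 + 1)).elim (-1) (fun c => (c : Int))
    rw [show lastCloser s (j + 1 + 1)
        = if ['<', '/'] <+: s.drop (j + 1) then some (j + 1) else lastCloser s (j + 1) from rfl]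
    by_cases h : ['<', '/'] <+: s.drop (j + 1)
    · rw [if_pos ((List.isPrefixOf_iff_prefix).mpr h), if_pos h]; rfl
    · rw [if_neg (by simpa using h), if_neg h]; exact ih
lemma rfind_eq_lastCloser (s : List Char) :
    PySem.Chars.rfind s ['<', '/']
      = (lastCloser s (s.length - 1)).elim (-1) (fun c => (c : Int)) := by
  show PySem.Chars.rfind.go s ['<', '/'] s.length = _
  cases hn : s.length with
  | zero =>
    have hs : s = [] := List.length_eq_zero_iff.mp hn
    subst hs
    rfl
  | succ k =>
    rw [go_eq]
    have h1 : ¬ ['<', '/'] <+: s.drop (k + 1) := fun h => by have := closer_len h; omega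
    have h2 : ¬ ['<', '/'] <+: s.drop k := fun h => by have := closer_len h; omega
    rw [show lastCloser s (k + 1 + 1)
        = if ['<', '/'] <+: s.drop (k + 1) then some (k + 1) else lastCloser s (k + 1) from rfl,
      if_neg h1,
      show lastCloser s (k + 1)
        = if ['<', '/'] <+: s.drop k then some k else lastCloser s k from rfl,
      if_neg h2]
    simp

-- ===== VERDICT (by name: the statement is the Claim_ definition above) =====
theorem return_overlapped_spec : Claim_equal_return_overlapped := by
  intro line _
  unfold Spec_return_overlapped return_overlapped return_overlapped_alt
  dsimp only
  cases hn : line.toList.length with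
  | zero =>
    rw [List.length_eq_zero_iff.mp hn]
    rfl
  | succ k =>
    rw [← hn]
    have hcast : ((line.toList.length : Int) - 1) = ((k : Nat) : Int) := by
      rw [hn]; push_cast; ring
    rw [hcast, loopA_inv, rfind_eq_lastCloser]
    rw [show line.toList.length - 1 = k from by omega]
    cases hlc : lastCloser line.toList k with
    | none => simp [hlc, ovVal]
    | some c =>
      obtain ⟨hck, hcc⟩ := lastCloser_spec _ _ _ hlc
      have hat := closer_head hcc
      have hmem : '<' ∈ line.toList := List.mem_of_getElem? hat
      obtain ⟨hnn, hfat, hmin⟩ := find_lt_spec _ hmem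
      have hfc : (PySem.Chars.find line.toList ['<']).toNat ≤ c := fn_le hat
      have hc2 : c + 2 ≤ line.toList.length := closer_len hcc
      simp only [hlc, Option.elim, ovVal]
      rw [if_neg (by omega)]
      rw [show ((c : Int) - PySem.Chars.find line.toList ['<']).toNat
          = c - (PySem.Chars.find line.toList ['<']).toNat from by omega]
      rw [show ((line.toList.length : Int) - (c : Int)).toNat
          = line.toList.length - c from by omega]
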